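-- pv_equiv track=rewrite | github.com/sumpfork/olwlg_stuff | olwlg_nametags/olwlg_nametags.py | _calculate_cutoffs
-- ===== SOURCE A (Python) =====
-- from typing import Iterator, List, Tuple, Dict, Any
--
-- def _calculate_cutoffs(
--     traders: List[Tuple[str, str]], num_groups: int = 3
-- ) -> List[int]:
--     """Calculate cutoff points for dividing traders into specified number of groups."""
--     total = len(traders)
--     cutoffs = []
--
--     # Calculate initial cutoff points
--     for i in range(1, num_groups + 1):
--         cutoffs.append(total * i // num_groups)
--
--     # Set the last cutoff to total to ensure we include all traders
--     cutoffs[-1] = total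
--
--     # Adjust cutoffs to align with first letter changes (except the last one)
--     for i in range(num_groups - 1):  # Don't adjust the last cutoff
--         while (
--             cutoffs[i] < total
--             and cutoffs[i] > 0
--             and traders[cutoffs[i]][0][0] == traders[cutoffs[i] - 1][0][0]
--         ):
--             cutoffs[i] += 1
--
--     return cutoffs
-- ===== SOURCE B (Python) =====
-- from typing import List, Tuple
--
-- def _calculate_cutoffs(
--     traders: List[Tuple[str, str]], num_groups: int = 3
-- ) -> List[int]:
--     """Calculate cutoff points for dividing traders into specified number of groups."""
--     total = len(traders)
--     # Index table: every position where the first letter changes, plus total as sentinel.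
--     boundaries = [b for b in range(1, total)
--                   if traders[b][0][0] != traders[b - 1][0][0]]
--     boundaries.append(total)
--     result = []
--     for i in range(1, num_groups):
--         c = total * i // num_groups
--         result.append(next(b for b in boundaries if b >= c) if c > 0 else 0)
--     result.append(total)
--     return result
-- ===== Notes on version B (the rewrite author's own statement) =====
-- stated objective: alternative
-- what changed: B precomputes in one pass the table of indices where the first letter changes (plus a trailing sentinel at total) and replaces A's per-cutoff forward walk through traders by a lookup of the first boundary >= the cutoff, keeping the 0-cutoff and last-cutoff rules.
-- outside the precondition, e.g. on _calculate_cutoffs([('a', 'x'), ('', 'y')], 1): A returns [2], B raises IndexError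
import Mathlib
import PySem

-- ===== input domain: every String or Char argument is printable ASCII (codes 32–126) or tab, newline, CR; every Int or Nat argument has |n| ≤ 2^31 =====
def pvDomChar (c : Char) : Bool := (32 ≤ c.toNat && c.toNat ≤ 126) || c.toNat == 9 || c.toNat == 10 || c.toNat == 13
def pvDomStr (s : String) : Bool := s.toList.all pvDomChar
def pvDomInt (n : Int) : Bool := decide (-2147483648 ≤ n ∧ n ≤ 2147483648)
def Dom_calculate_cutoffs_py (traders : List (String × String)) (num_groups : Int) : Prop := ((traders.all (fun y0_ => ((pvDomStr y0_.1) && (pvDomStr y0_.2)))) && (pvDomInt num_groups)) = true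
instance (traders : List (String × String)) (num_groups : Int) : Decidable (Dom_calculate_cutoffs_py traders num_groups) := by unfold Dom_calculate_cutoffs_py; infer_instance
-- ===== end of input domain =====

-- B replaces A's per-cutoff forward walk through the trader list by a precomputed
-- table of first-letter-boundary indices and a first-boundary-≥-cutoff lookup (alternative decomposition, same results).


-- ===== PORT A =====

-- traders[i][0][0]: first character of the i-th name; none exactly where Python raises IndexError
def pvFirst? (traders : List (String × String)) (i : Int) : Option Char :=
  match PySem.List.pyGet? traders i with
  | some p => PySem.Str.pyGet? p.1 0
  | none => none

-- the inner 'while' of A: increment c while it is strictly inside and the first letter does not change at c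
def pvAdjA (traders : List (String × String)) (total c : Int) : Int :=
  if h : c < total ∧ 0 < c ∧ pvFirst? traders c = pvFirst? traders (c - 1) then
    pvAdjA traders total (c + 1)
  else c
termination_by (total - c).toNat
decreasing_by omega

def calculate_cutoffs_py (traders : List (String × String)) (num_groups : Int) : List Int :=
  let total : Int := traders.length
  -- for i in range(1, num_groups+1): cutoffs.append(total*i // num_groups)
  let cutoffs :=
    (PySem.List.pyRange 1 (num_groups + 1) 1).foldl
      (fun acc i => acc ++ [PySem.Int.floordiv (total * i) num_groups]) []
  -- cutoffs[-1] = total  (IndexError on empty cutoffs, i.e. num_groups ≤ 0: excluded by Pre_; guard only totalises)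
  let cutoffs := if cutoffs.isEmpty then cutoffs else cutoffs.dropLast ++ [total]
  -- for i in range(num_groups-1): the while loop on cutoffs[i]
  (PySem.List.pyRange 0 (num_groups - 1) 1).foldl
    (fun cs i => cs.set i.toNat (pvAdjA traders total (PySem.List.pyGetD cs i 0))) cutoffs

-- ===== PORT B =====

-- next(b for b in boundaries if b >= c); the getD 0 covers Python's (unreachable under Pre_) StopIteration
def pvNextB (bs : List Int) (c : Int) : Int :=
  (bs.find? (fun b => decide (c ≤ b))).getD 0

def calculate_cutoffs_py_alt (traders : List (String × String)) (num_groups : Int) : List Int :=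
  let total : Int := traders.length
  let boundaries :=
    (PySem.List.pyRange 1 total 1).filter
      (fun b => decide (pvFirst? traders b ≠ pvFirst? traders (b - 1)))
  let bs := boundaries ++ [total]
  let result :=
    (PySem.List.pyRange 1 num_groups 1).foldl
      (fun acc i =>
        let c := PySem.Int.floordiv (total * i) num_groups
        acc ++ [if 0 < c then pvNextB bs c else 0]) []
  result ++ [total]

-- ===== PRECONDITION & SPEC =====
-- Pre_ excludes num_groups ≤ 0 (A raises IndexError on cutoffs[-1]) and traders with an empty
-- name, on which B's full boundary scan (and, on most inputs, A's walk) raises IndexError,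
-- even though A can return on some of them (e.g. when num_groups = 1 it never reads names).
def Pre_calculate_cutoffs_py (traders : List (String × String)) (num_groups : Int) : Prop :=
  1 ≤ num_groups ∧ ∀ p ∈ traders, p.1 ≠ ""
instance (traders : List (String × String)) (num_groups : Int) : Decidable (Pre_calculate_cutoffs_py traders num_groups) := by
  unfold Pre_calculate_cutoffs_py; infer_instance

def pvWitness_calculate_cutoffs_py : (List (String × String)) × Int :=
  ([("alice", "1"), ("bob", "2"), ("bert", "3"), ("carol", "4")], 2)

def Spec_calculate_cutoffs_py (traders : List (String × String)) (num_groups : Int) (out : List Int) : Prop := out = calculate_cutoffs_py_alt traders num_groups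
instance (traders : List (String × String)) (num_groups : Int) (out : List Int) : Decidable (Spec_calculate_cutoffs_py traders num_groups out) := by unfold Spec_calculate_cutoffs_py; infer_instance

-- ===== CLAIM (what is proved, stated in full; the proofs are below) =====
def Claim_equal_calculate_cutoffs_py : Prop := ∀ (traders : List (String × String)) (num_groups : Int), Dom_calculate_cutoffs_py traders num_groups → Pre_calculate_cutoffs_py traders num_groups → Spec_calculate_cutoffs_py traders num_groups (calculate_cutoffs_py traders num_groups)

-- ===== LEMMAS AND PROOFS =====

-- find? with threshold c on a strictly increasing list returns the minimal member satisfying it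
theorem pv_find?_min (c x : Int) (l : List Int) (hsort : l.Pairwise (· < ·))
    (hx : x ∈ l) (hcx : c ≤ x) (hmin : ∀ y ∈ l, c ≤ y → x ≤ y) :
    l.find? (fun b => decide (c ≤ b)) = some x := by
  induction l with
  | nil => cases hx
  | cons a t ih =>
    rcases List.pairwise_cons.mp hsort with ⟨ha, ht⟩
    by_cases hca : c ≤ a
    · have hxa : x = a := by
        rcases List.mem_cons.mp hx with h | h
        · exact h
        · have h1 := ha x h
          have h2 := hmin a (List.mem_cons_self ..) hca
          omega
      rw [List.find?_cons_of_pos (by simpa using hca), hxa]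
    · have hxt : x ∈ t := by
        rcases List.mem_cons.mp hx with h | h
        · subst h; omega
        · exact h
      rw [List.find?_cons_of_neg (by simpa using hca)]
      exact ih ht hxt (fun y hy hcy => hmin y (List.mem_cons_of_mem _ hy) hcy)

theorem pv_find?_congr (p q : Int → Bool) (l : List Int) (h : ∀ x ∈ l, p x = q x) :
    l.find? p = l.find? q := by
  induction l with
  | nil => rfl
  | cons a t ih =>
    have ha := h a (List.mem_cons_self ..)
    by_cases hpa : p a = true
    · rw [List.find?_cons_of_pos hpa, List.find?_cons_of_pos (ha ▸ hpa)]
    · rw [List.find?_cons_of_neg hpa, List.find?_cons_of_neg (ha ▸ hpa)]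
      exact ih (fun y hy => h y (List.mem_cons_of_mem _ hy))

-- the boundary table of B is strictly increasing
theorem pv_bs_sorted (P : Int → Bool) (total : Int) :
    (((PySem.List.pyRange 1 total 1).filter P) ++ [total]).Pairwise (· < ·) := by
  apply List.pairwise_append.mpr
  refine ⟨List.Pairwise.filter P (PySem.List.pairwise_lt_pyRange_one 1 total),
    List.pairwise_singleton _ _, ?_⟩
  intro x hx y hy
  have hx' := List.mem_of_mem_filter hx
  have hb := PySem.List.mem_pyRange_one.mp hx'
  have hy' : y = total := by simpa using hy
  omega

-- A's inner while loop computes exactly B's first-boundary-not-below-c lookup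
theorem pv_adjA_eq_find (traders : List (String × String)) (total c : Int)
    (h0 : 0 < c) (hle : c ≤ total) :
    ((PySem.List.pyRange 1 total 1).filter
        (fun b => decide (pvFirst? traders b ≠ pvFirst? traders (b - 1))) ++ [total]).find?
      (fun b => decide (c ≤ b)) = some (pvAdjA traders total c) := by
  rw [pvAdjA]
  split
  · rename_i h
    rw [← pv_adjA_eq_find traders total (c + 1) (by omega) (by omega)]
    apply pv_find?_congr
    intro x hx
    have hxc : x ≠ c := by
      rcases List.mem_append.mp hx with hf | hs
      · intro he
        subst he
        have hp := List.of_mem_filter hf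
        simp only [decide_eq_true_eq] at hp
        exact hp h.2.2
      · have hxt : x = total := by simpa using hs
        omega
    rcases Int.lt_or_le x c with h1 | h1
    · simp [show ¬ (c ≤ x) by omega, show ¬ (c + 1 ≤ x) by omega]
    · simp [show c ≤ x by omega, show c + 1 ≤ x by omega]
  · rename_i h
    apply pv_find?_min c c _ (pv_bs_sorted _ total) ?_ (le_refl c) (fun y _ hy => hy)
    rcases Int.lt_or_le c total with hlt | hge
    · have hne : pvFirst? traders c ≠ pvFirst? traders (c - 1) := fun he => h ⟨hlt, h0, he⟩
      exact List.mem_append.mpr (Or.inl (List.mem_filter.mpr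
        ⟨PySem.List.mem_pyRange_one.mpr ⟨by omega, hlt⟩, decide_eq_true hne⟩))
    · have hct : c = total := by omega
      subst hct
      exact List.mem_append.mpr (Or.inr (by simp))
termination_by (total - c).toNat
decreasing_by omega

-- A's adjustment pass: setting each of the first m cells to its adjusted value maps the prefix
theorem pv_set_fold (traders : List (String × String)) (total : Int) (m : Nat) (cs : List Int)
    (hm : m ≤ cs.length) :
    (PySem.List.pyRange 0 (m : Int) 1).foldl
      (fun l i => l.set i.toNat (pvAdjA traders total (PySem.List.pyGetD l i 0))) cs
    = (cs.take m).map (pvAdjA traders total) ++ cs.drop m := by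
  induction m with
  | zero => simp [PySem.List.pyRange_one_eq_nil (le_refl (0 : Int))]
  | succ m ih =>
    have hmlt : m < cs.length := hm
    have hcast : (((m + 1 : Nat)) : Int) = (m : Int) + 1 := by push_cast; ring
    rw [hcast, PySem.List.pyRange_one_succ_right (by positivity), List.foldl_append,
      ih (Nat.le_of_succ_le hm)]
    simp only [List.foldl_cons, List.foldl_nil]
    rw [PySem.List.pyGetD_natCast]
    have hlen : ((cs.take m).map (pvAdjA traders total)).length = m := by
      simp [Nat.min_eq_left (Nat.le_of_succ_le hm)]
    have hdrop : cs.drop m = cs[m] :: cs.drop (m + 1) := List.drop_eq_getElem_cons hmlt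
    have hget : ((cs.take m).map (pvAdjA traders total) ++ cs.drop m).getD m 0 = cs[m] := by
      rw [hdrop, List.getD_eq_getElem?_getD, List.getElem?_append_right (by omega), hlen]
      simp [List.getElem?_eq_getElem hmlt]
    rw [hget]
    have hset : ((cs.take m).map (pvAdjA traders total) ++ cs.drop m).set
        ((m : Int).toNat) (pvAdjA traders total cs[m])
        = (cs.take m).map (pvAdjA traders total) ++ (pvAdjA traders total cs[m] :: cs.drop (m + 1)) := by
      rw [show ((m : Int)).toNat = m by omega, List.set_append, if_neg (by omega), hlen]
      rw [Nat.sub_self, hdrop]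
      rfl
    have htake : cs.take (m + 1) = cs.take m ++ [cs[m]] := by
      rw [List.take_add_one, List.getElem?_eq_getElem hmlt]; rfl
    rw [hset, htake, List.map_append]
    simp

-- ===== VERDICT (by name: the statement is the Claim_ definition above) =====
theorem calculate_cutoffs_py_spec : Claim_equal_calculate_cutoffs_py := by
  intro traders ng hdom hpre
  obtain ⟨hng, -⟩ := hpre
  unfold Spec_calculate_cutoffs_py calculate_cutoffs_py calculate_cutoffs_py_alt
  simp only [PySem.List.foldl_append_singleton_eq_map, List.nil_append]
  rw [PySem.List.pyRange_one_succ_right hng, List.map_append, List.map_singleton,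
    if_neg (by simp)]
  rw [List.dropLast_concat]
  have hm : ng - 1 = (((ng - 1).toNat : Nat) : Int) := by omega
  have hlenR : (PySem.List.pyRange 1 ng 1).length = (ng - 1).toNat :=
    PySem.List.length_pyRange_one 1 ng
  rw [hm, pv_set_fold traders (traders.length : Int) ((ng - 1).toNat)
    _ (by simp [hlenR])]
  rw [List.take_left' (by simp [hlenR]), List.drop_left' (by simp [hlenR])]
  rw [List.map_map]
  congr 1
  apply List.map_congr_left
  intro i hi
  obtain ⟨hi1, hi2⟩ := PySem.List.mem_pyRange_one.mp hi
  simp only [Function.comp_apply]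
  have hngpos : (0 : Int) < ng := by omega
  have htotnn : (0 : Int) ≤ (traders.length : Int) := Int.natCast_nonneg _
  have hcdiv : PySem.Int.floordiv ((traders.length : Int) * i) ng
      = ((traders.length : Int) * i) / ng := PySem.Int.floordiv_eq_ediv_of_pos hngpos
  have hc0 : 0 ≤ PySem.Int.floordiv ((traders.length : Int) * i) ng := by
    rw [hcdiv]
    exact Int.ediv_nonneg (by positivity) (by omega)
  have hcle : PySem.Int.floordiv ((traders.length : Int) * i) ng ≤ (traders.length : Int) := by
    rw [hcdiv]
    calc ((traders.length : Int) * i) / ng ≤ ((traders.length : Int) * ng) / ng :=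
          Int.ediv_le_ediv hngpos (mul_le_mul_of_nonneg_left (by omega) htotnn)
      _ = (traders.length : Int) := Int.mul_ediv_cancel _ (by omega)
  by_cases hc : 0 < PySem.Int.floordiv ((traders.length : Int) * i) ng
  · rw [if_pos hc]
    unfold pvNextB
    rw [pv_adjA_eq_find traders (traders.length : Int) _ hc hcle]
    rfl
  · rw [if_neg hc]
    have hz : PySem.Int.floordiv ((traders.length : Int) * i) ng = 0 := by omega
    rw [hz, pvAdjA]
    simp
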